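-- pv_equiv track=rewrite | github.com/doocs/leetcode | solution/3500-3599/3572.Maximize Y‑Sum by Picking a Triplet of Distinct X‑Values/Solution.py | maxSumDistinctTriplet
-- ===== SOURCE A (Python) =====
-- from typing import List
--
-- def maxSumDistinctTriplet(x: List[int], y: List[int]) -> int:
--     arr = [(a, b) for a, b in zip(x, y)]
--     arr.sort(key=lambda x: -x[1])
--     vis = set()
--     ans = 0
--     for a, b in arr:
--         if a in vis:
--             continue
--         vis.add(a)
--         ans += b
--         if len(vis) == 3:
--             return ans
--     return -1
-- ===== SOURCE B (Python) =====
-- from typing import List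
--
-- def maxSumDistinctTriplet(x: List[int], y: List[int]) -> int:
--     best = {}
--     for a, b in zip(x, y):
--         best[a] = max(best.get(a, b), b)
--     vals = sorted(best.values(), reverse=True)
--     return sum(vals[:3]) if len(vals) >= 3 else -1
-- ===== Notes on version B (the rewrite author's own statement) =====
-- stated objective: alternative
-- what changed: Replaces A's sort of all n pairs by descending y plus a greedy visited-set scan with a single dict pass keeping the max y per x, then sorting only the k distinct per-x maxima descending and summing the top three.
import Mathlib
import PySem

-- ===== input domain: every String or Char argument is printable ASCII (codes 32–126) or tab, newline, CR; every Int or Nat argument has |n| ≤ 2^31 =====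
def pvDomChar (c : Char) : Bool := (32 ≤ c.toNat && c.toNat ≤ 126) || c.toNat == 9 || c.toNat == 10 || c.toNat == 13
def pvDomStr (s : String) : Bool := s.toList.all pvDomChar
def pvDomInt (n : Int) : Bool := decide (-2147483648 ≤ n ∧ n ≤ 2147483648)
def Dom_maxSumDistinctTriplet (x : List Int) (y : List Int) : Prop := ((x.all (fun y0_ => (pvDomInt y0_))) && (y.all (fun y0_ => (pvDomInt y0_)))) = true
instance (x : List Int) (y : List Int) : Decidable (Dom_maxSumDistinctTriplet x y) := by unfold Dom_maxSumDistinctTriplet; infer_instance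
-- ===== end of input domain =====

-- B replaces A's sort-all-pairs + greedy visited-set scan by a max-per-x dict whose
-- (far fewer, distinct) values are sorted descending and the top three summed; equal return values proved.

-- ===== PORT A =====
-- the 'for a, b in arr: …' loop with its early 'return ans' at len(vis) == 3
def pyLoopA : List (Int × Int) → PySem.Set Int → Int → Int
  | [], _, _ => -1
  | (a, b) :: t, vis, ans =>
    if PySem.Set.contains vis a then pyLoopA t vis ans
    else
      let vis' := PySem.Set.add vis a
      let ans' := ans + b
      if vis'.length = 3 then ans' else pyLoopA t vis' ans'

def maxSumDistinctTriplet (x : List Int) (y : List Int) : Int :=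
  let arr := List.zip x y
  let arr := PySem.List.sorted arr (fun p => -p.2) false
  pyLoopA arr PySem.Set.empty 0

-- ===== PORT B =====
def maxSumDistinctTriplet_alt (x : List Int) (y : List Int) : Int :=
  let best : PySem.Dict Int Int :=
    (List.zip x y).foldl (fun d p => d.insert p.1 (max (d.getD p.1 p.2) p.2)) PySem.Dict.empty
  let vals := PySem.List.sorted best.values (fun v => v) true
  if 3 ≤ vals.length then (PySem.List.slice vals none (some 3)).sum else -1

-- ===== PRECONDITION & SPEC =====
def Spec_maxSumDistinctTriplet (x : List Int) (y : List Int) (out : Int) : Prop := out = maxSumDistinctTriplet_alt x y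
instance (x : List Int) (y : List Int) (out : Int) : Decidable (Spec_maxSumDistinctTriplet x y out) := by unfold Spec_maxSumDistinctTriplet; infer_instance

-- ===== CLAIM (what is proved, stated in full; the proofs are below) =====
def Claim_equal_maxSumDistinctTriplet : Prop := ∀ (x : List Int) (y : List Int), Dom_maxSumDistinctTriplet x y → Spec_maxSumDistinctTriplet x y (maxSumDistinctTriplet x y)

-- ===== LEMMAS AND PROOFS =====

-- the values A's loop adds to ans, in order, ignoring the cut-off at three
def picksA : List (Int × Int) → PySem.Set Int → List Int
  | [], _ => []
  | (a, b) :: t, vis =>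
    if PySem.Set.contains vis a then picksA t vis else b :: picksA t (PySem.Set.add vis a)

lemma length_add_of_not_contains {vis : PySem.Set Int} {a : Int} (h : ¬ PySem.Set.contains vis a) :
    (PySem.Set.add vis a).length = vis.length + 1 := by
  simp only [PySem.Set.add]
  rw [if_neg (by simpa [PySem.Set.contains] using h)]
  simp

lemma loopA_eq (l : List (Int × Int)) : ∀ (vis : PySem.Set Int) (ans : Int), vis.length < 3 →
    pyLoopA l vis ans =
      if 3 ≤ vis.length + (picksA l vis).length
      then ans + ((picksA l vis).take (3 - vis.length)).sum else -1 := by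
  induction l with
  | nil => intro vis ans h; simp [pyLoopA, picksA]; omega
  | cons p t ih =>
    obtain ⟨a, b⟩ := p
    intro vis ans h
    by_cases hc : PySem.Set.contains vis a
    · simp only [pyLoopA, picksA, hc, if_true]
      exact ih vis ans h
    · have hlen := length_add_of_not_contains hc
      simp only [pyLoopA, picksA, hc, if_false, Bool.false_eq_true]
      by_cases h3 : (PySem.Set.add vis a).length = 3
      · simp only [h3, if_true]
        rw [if_pos (by simp; omega)]
        have h1 : 3 - vis.length = 1 := by omega
        rw [h1, List.take_succ_cons, List.take_zero, List.sum_cons, List.sum_nil, add_zero]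
      · simp only [h3, if_false]
        rw [ih _ (ans + b) (by omega), hlen]
        simp only [List.length_cons]
        have ht : 3 - vis.length = (3 - (vis.length + 1)) + 1 := by omega
        by_cases hge : 3 ≤ vis.length + 1 + (picksA t (PySem.Set.add vis a)).length
        · rw [if_pos hge, if_pos (by omega), ht, List.take_succ_cons, List.sum_cons]
          ring
        · rw [if_neg hge, if_neg (by omega)]

def ysOf (a : Int) (l : List (Int × Int)) : List Int :=
  (l.filter (fun p => p.1 == a)).map Prod.snd
def firstB (a : Int) (l : List (Int × Int)) : Int :=
  (((l.find? (fun p => p.1 == a)).map Prod.snd).getD 0)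
def keyL (l : List (Int × Int)) (vis : PySem.Set Int) : List Int :=
  ((l.map Prod.fst).dedup).filter (fun a => !(vis.contains a))

lemma picksA_sublist (l : List (Int × Int)) : ∀ vis, (picksA l vis).Sublist (l.map Prod.snd) := by
  induction l with
  | nil => intro vis; simp [picksA]
  | cons p t ih =>
    obtain ⟨a, b⟩ := p
    intro vis
    by_cases hc : PySem.Set.contains vis a
    · simp only [picksA, hc, if_true, List.map_cons]
      exact (ih vis).cons _
    · simp only [picksA, hc, if_false, Bool.false_eq_true, List.map_cons]
      exact (ih _).cons₂ _

lemma firstB_cons_ne {a a' b : Int} {t : List (Int × Int)} (h : a' ≠ a) :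
    firstB a' ((a, b) :: t) = firstB a' t := by
  simp [firstB, (by simpa using h.symm : ¬ (a == a') = true)]

lemma ysOf_cons_ne {a a' b : Int} {t : List (Int × Int)} (h : a' ≠ a) :
    ysOf a' ((a, b) :: t) = ysOf a' t := by
  simp [ysOf, (by simpa using h.symm : ¬ (a == a') = true)]

lemma filter_perm_pick (L : List Int) (a : Int) (p : Int → Bool) (hnd : L.Nodup)
    (ha : a ∈ L) (hp : p a = true) :
    (L.filter p).Perm (a :: L.filter (fun x => p x && !(x == a))) := by
  have h1 : L.Perm (a :: L.erase a) := List.perm_cons_erase ha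
  have h2 := h1.filter p
  rw [List.filter_cons, if_pos hp] at h2
  have h3 : (L.erase a).filter p = L.filter (fun x => p x && !(x == a)) := by
    rw [hnd.erase_eq_filter, List.filter_filter]
    exact List.filter_congr (fun x hx => by simp [bne])
  rw [h3] at h2
  exact h2

lemma contains_add_iff (vis : PySem.Set Int) (a x : Int) :
    (PySem.Set.add vis a).contains x = (vis.contains x || x == a) := by
  by_cases h : vis.contains a
  · unfold PySem.Set.add
    rw [if_pos h]
    by_cases hx : x = a
    · subst hx; rw [h]; simp
    · simp [hx]
  · unfold PySem.Set.add
    rw [if_neg h]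
    unfold PySem.Set.contains
    simp [beq_eq_decide]

lemma picksA_perm (l : List (Int × Int)) : ∀ vis,
    (picksA l vis).Perm ((keyL l vis).map (fun a => firstB a l)) := by
  induction l with
  | nil => intro vis; simp [picksA, keyL]
  | cons p t ih =>
    obtain ⟨a, b⟩ := p
    intro vis
    by_cases hc : PySem.Set.contains vis a
    · -- key a is already visited: both sides reduce to the tail with vis
      simp only [picksA, hc, if_true]
      have hkey : keyL ((a, b) :: t) vis = keyL t vis := by
        simp only [keyL, List.map_cons]
        by_cases hm : a ∈ t.map Prod.fst
        · rw [List.dedup_cons_of_mem hm]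
        · rw [List.dedup_cons_of_notMem hm, List.filter_cons, if_neg (by simpa using hc)]
      rw [hkey]
      have hmap : ((keyL t vis).map (fun a' => firstB a' ((a, b) :: t)))
          = (keyL t vis).map (fun a' => firstB a' t) := by
        apply List.map_congr_left
        intro a' ha'
        have : a' ≠ a := by
          simp only [keyL, List.mem_filter] at ha'
          intro he; subst he
          rw [Bool.not_eq_true'] at ha'
          rw [ha'.2] at hc
          exact Bool.false_ne_true hc
        exact firstB_cons_ne this
      rw [hmap]; exact ih vis
    · simp only [picksA, hc, if_false, Bool.false_eq_true]
      have hFa : firstB a ((a, b) :: t) = b := by simp [firstB]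
      have hK'prop : ∀ x ∈ keyL t (PySem.Set.add vis a), x ≠ a ∧ ¬ vis.contains x := by
        intro x hx
        simp only [keyL, List.mem_filter, Bool.not_eq_true'] at hx
        have := hx.2
        rw [contains_add_iff] at this
        simp only [Bool.or_eq_false_iff] at this
        refine ⟨by simpa using this.2, by rw [this.1]; simp⟩
      have hC : (keyL ((a, b) :: t) vis).Perm (a :: keyL t (PySem.Set.add vis a)) := by
        simp only [keyL, List.map_cons]
        by_cases hm : a ∈ t.map Prod.fst
        · rw [List.dedup_cons_of_mem hm]
          have hperm := filter_perm_pick ((t.map Prod.fst).dedup) a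
            (fun x => !(vis.contains x)) (List.nodup_dedup _)
            (List.mem_dedup.mpr hm) (by rw [Bool.not_eq_true']; rw [Bool.not_eq_true] at hc; exact hc)
          have heq : ((t.map Prod.fst).dedup).filter (fun x => !(vis.contains x) && !(x == a))
              = ((t.map Prod.fst).dedup).filter (fun x => !((PySem.Set.add vis a).contains x)) := by
            apply List.filter_congr
            intro x hx
            rw [contains_add_iff, Bool.not_or]
          rw [heq] at hperm
          exact hperm
        · rw [List.dedup_cons_of_notMem hm, List.filter_cons, if_pos (by rw [Bool.not_eq_true']; rw [Bool.not_eq_true] at hc; exact hc)]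
          have heq : ((t.map Prod.fst).dedup).filter (fun x => !(vis.contains x))
              = ((t.map Prod.fst).dedup).filter (fun x => !((PySem.Set.add vis a).contains x)) := by
            apply List.filter_congr
            intro x hx
            have hxa : ¬ (x == a) = true := by
              simp only [beq_iff_eq]
              intro he; subst he; exact hm (List.mem_dedup.mp hx)
            rw [contains_add_iff]
            simp [hxa]
          rw [heq]
      have hmapeq : ((a :: keyL t (PySem.Set.add vis a)).map (fun a' => firstB a' ((a, b) :: t)))
          = b :: (keyL t (PySem.Set.add vis a)).map (fun a' => firstB a' t) := by
        simp only [List.map_cons, hFa]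
        congr 1
        apply List.map_congr_left
        intro a' ha'
        exact firstB_cons_ne (hK'prop a' ha').1
      have h1 := List.Perm.cons b (ih (PySem.Set.add vis a))
      refine h1.trans ?_
      rw [← hmapeq]
      exact (hC.map _).symm
lemma ysOf_subset_snd (a : Int) (l : List (Int × Int)) : ∀ v ∈ ysOf a l, v ∈ l.map Prod.snd := by
  intro v hv
  simp only [ysOf, List.mem_map, List.mem_filter] at hv
  obtain ⟨p, ⟨hp, _⟩, hv⟩ := hv
  exact List.mem_map.mpr ⟨p, hp, hv⟩

lemma firstB_is_max (l : List (Int × Int))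
    (hs : (l.map Prod.snd).Pairwise (fun u v => v ≤ u)) :
    ∀ a ∈ l.map Prod.fst, firstB a l ∈ ysOf a l ∧ ∀ v ∈ ysOf a l, v ≤ firstB a l := by
  induction l with
  | nil => simp
  | cons p t ih =>
    obtain ⟨a0, b0⟩ := p
    simp only [List.map_cons, List.pairwise_cons] at hs
    intro a ha
    by_cases hx : a = a0
    · subst hx
      have hfb : firstB a ((a, b0) :: t) = b0 := by simp [firstB]
      have hys : ysOf a ((a, b0) :: t) = b0 :: ysOf a t := by simp [ysOf]
      rw [hfb, hys]
      refine ⟨List.mem_cons_self, ?_⟩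
      intro v hv
      rcases List.mem_cons.mp hv with h | h
      · exact le_of_eq h
      · exact hs.1 v (ysOf_subset_snd a t v h)
    · have ha' : a ∈ t.map Prod.fst := by
        rcases List.mem_cons.mp ha with h | h
        · exact absurd h hx
        · exact h
      rw [firstB_cons_ne hx, ysOf_cons_ne hx]
      exact ih hs.2 a ha'

lemma get?_bestFold (l : List (Int × Int)) :
    ∀ (d : PySem.Dict Int Int) (a : Int),
      (l.foldl (fun d p => d.insert p.1 (max (d.getD p.1 p.2) p.2)) d).get? a
        = (ysOf a l).foldl (fun o b => some (max (o.getD b) b)) (d.get? a) := by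
  induction l with
  | nil => intro d a; simp [ysOf]
  | cons p t ih =>
    obtain ⟨a0, b0⟩ := p
    intro d a
    simp only [List.foldl_cons]
    rw [ih]
    by_cases hx : a = a0
    · subst hx
      have hys : ysOf a ((a, b0) :: t) = b0 :: ysOf a t := by simp [ysOf]
      rw [hys, List.foldl_cons, PySem.Dict.get?_insert_self, PySem.Dict.getD_eq_get?_getD]
    · rw [ysOf_cons_ne hx, PySem.Dict.get?_insert_of_ne (hne := hx)]

lemma optfold_some (t : List Int) : ∀ c : Int,
    t.foldl (fun o b => some (max (o.getD b) b)) (some c) = some (t.foldl max c) := by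
  induction t with
  | nil => intro c; rfl
  | cons b t ih => intro c; simp only [List.foldl_cons, Option.getD_some]; exact ih _
lemma AB_eq (x y : List Int) :
    (let arr := PySem.List.sorted (List.zip x y) (fun p => -p.2) false
     pyLoopA arr PySem.Set.empty 0)
    = (let best : PySem.Dict Int Int :=
         (List.zip x y).foldl (fun d p => d.insert p.1 (max (d.getD p.1 p.2) p.2)) PySem.Dict.empty
       let vals := PySem.List.sorted best.values (fun v => v) true
       if 3 ≤ vals.length then (PySem.List.slice vals none (some 3)).sum else -1) := by
  set l := List.zip x y with hl
  set S := PySem.List.sorted l (fun p => -p.2) false with hS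
  set best := l.foldl (fun d p => d.insert p.1 (max (d.getD p.1 p.2) p.2)) PySem.Dict.empty with hbest
  set vals := PySem.List.sorted best.values (fun v => v) true with hvals
  set P := picksA S PySem.Set.empty with hPdef
  have hSl : S.Perm l := PySem.List.sorted_perm l (fun p => -p.2) false
  have hkeys : best.keys = PySem.Set.ofList (l.map Prod.fst) := by
    rw [hbest, PySem.Dict.keys_foldl_insert_key l Prod.fst
      (fun d p => max (d.getD p.1 p.2) p.2) PySem.Dict.empty]
    rfl
  have hnodupK : best.keys.Nodup := by
    rw [hbest]
    exact PySem.Dict.nodup_keys_foldl_insert_key l Prod.fst _ _ PySem.Dict.nodup_keys_empty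
  have hvalues : best.values = best.keys.map (fun k => best.getD k 0) :=
    PySem.Dict.values_eq_map_keys best hnodupK 0
  have hsorted : (S.map Prod.snd).Pairwise (fun u v => v ≤ u) := by
    have h0 := PySem.List.sorted_pairwise l (fun p => -p.2)
    rw [List.pairwise_map]
    exact h0.imp (by intro p q h; simpa using h)
  have hget : ∀ a ∈ l.map Prod.fst,
      (best.getD a 0) ∈ ysOf a l ∧ ∀ v ∈ ysOf a l, v ≤ best.getD a 0 := by
    intro a ha
    obtain ⟨p, hp, hpa⟩ := List.mem_map.mp ha
    have hne : ysOf a l ≠ [] := by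
      simp only [ysOf]
      intro hcon
      have : p ∈ l.filter (fun q => q.1 == a) :=
        List.mem_filter.mpr ⟨hp, by simp [hpa]⟩
      rw [List.map_eq_nil_iff] at hcon
      rw [hcon] at this
      exact List.not_mem_nil this
    obtain ⟨b, tl, heq⟩ := List.exists_cons_of_ne_nil hne
    have hget? : best.get? a = some (tl.foldl max b) := by
      rw [hbest, get?_bestFold, PySem.Dict.get?_empty, heq, List.foldl_cons]
      simp only [Option.getD_none, max_self]
      exact optfold_some tl b
    have hgd : best.getD a 0 = tl.foldl max b := by
      rw [PySem.Dict.getD_eq_get?_getD, hget?]; rfl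
    rw [hgd, heq]
    constructor
    · rcases PySem.List.foldl_max_mem tl b with h | h
      · rw [h]; exact List.mem_cons_self
      · exact List.mem_cons_of_mem _ h
    · intro v hv
      rcases List.mem_cons.mp hv with h | h
      · rw [h]; exact (PySem.List.le_foldl_max tl b).1
      · exact (PySem.List.le_foldl_max tl b).2 v h
  have hmemS : ∀ a : Int, a ∈ S.map Prod.fst ↔ a ∈ l.map Prod.fst :=
    fun a => (hSl.map Prod.fst).mem_iff
  have hPB : ∀ a ∈ l.map Prod.fst, firstB a S = best.getD a 0 := by
    intro a ha
    have hfm := firstB_is_max S hsorted a ((hmemS a).mpr ha)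
    have hgm := hget a ha
    have hyp : (ysOf a S).Perm (ysOf a l) := (hSl.filter _).map _
    apply le_antisymm
    · exact hgm.2 _ (hyp.mem_iff.mp hfm.1)
    · exact hfm.2 _ (hyp.mem_iff.mpr hgm.1)
  have hkeyL : keyL S PySem.Set.empty = (S.map Prod.fst).dedup := by
    simp [keyL, PySem.Set.empty, PySem.Set.contains]
  have hdk : ((S.map Prod.fst).dedup).Perm best.keys := by
    rw [List.perm_ext_iff_of_nodup (List.nodup_dedup _) hnodupK]
    intro a
    rw [List.mem_dedup, hmemS a, hkeys, PySem.Set.mem_ofList]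
  have hPperm : P.Perm best.values := by
    have h1 := picksA_perm S PySem.Set.empty
    rw [hkeyL] at h1
    have h2 : ((S.map Prod.fst).dedup).map (fun a => firstB a S)
        = ((S.map Prod.fst).dedup).map (fun a => best.getD a 0) := by
      apply List.map_congr_left
      intro a ha
      exact hPB a ((hmemS a).mp (List.mem_dedup.mp ha))
    rw [h2] at h1
    refine h1.trans ?_
    rw [hvalues]
    exact hdk.map _
  have hPvals : P.Perm vals := by
    refine hPperm.trans ?_
    exact (PySem.List.sorted_perm best.values (fun v => v) true).symm
  have hPsorted : P.Pairwise (fun u v : Int => v ≤ u) :=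
    hsorted.sublist (picksA_sublist S PySem.Set.empty)
  have hvalssorted : vals.Pairwise (fun u v : Int => v ≤ u) := by
    have := PySem.List.sorted_pairwise_rev best.values (fun v => v)
    simpa using this
  have hPeq : P = vals :=
    hPvals.eq_of_pairwise (fun a b _ _ h1 h2 => le_antisymm h2 h1) hPsorted hvalssorted
  have hslice : PySem.List.slice vals none (some 3) = vals.take 3 := by
    rw [show (3:Int) = ((3:Nat):Int) by norm_num]
    exact PySem.List.slice_to_natCast vals 3
  simp only []
  rw [loopA_eq S PySem.Set.empty 0 (by simp [PySem.Set.empty])]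
  rw [← hPdef, hPeq, hslice]
  have hlen : (PySem.Set.empty : PySem.Set Int).length = 0 := rfl
  rw [hlen, Nat.zero_add, zero_add, Nat.sub_zero]

-- ===== VERDICT (by name: the statement is the Claim_ definition above) =====
theorem maxSumDistinctTriplet_spec : Claim_equal_maxSumDistinctTriplet := by
  intro x y _
  unfold Spec_maxSumDistinctTriplet maxSumDistinctTriplet maxSumDistinctTriplet_alt
  exact AB_eq x y
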